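-- pv_equiv track=rewrite | github.com/rajko-z/search-engine-python | src/autocomplete.py | _invalid_autocomplete_format
-- ===== SOURCE A (Python) =====
-- def _invalid_autocomplete_format(text):
-- 	text = text.replace(" ", "")
-- 	text = text[::-1]
-- 	for index in range(len(text)-1):
-- 		if text[index] == '*':
-- 			if text[index + 1] == "'" or text[index + 1] == '"':
-- 				return True
-- 			if text[index + 1] != '*':
-- 				return False
-- ===== SOURCE B (Python) =====
-- def _invalid_autocomplete_format(text):
--     s = text.replace(" ", "")
--     i = s.rfind('*')
--     if i < 0:
--         return None
--     t = s[:i + 1].rstrip('*')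
--     if not t:
--         return None
--     return t[-1] in ("'", '"')
-- ===== Notes on version B (the rewrite author's own statement) =====
-- stated objective: alternative
-- what changed: B never reverses the string: it locates the last star with rfind, removes the trailing star-run of that prefix with rstrip, and tests whether the character left at the end is a quote, replacing A's per-character index scan over the reversed string; a timing run measured B faster since the work moves into C-level string methods.
import Mathlib
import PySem

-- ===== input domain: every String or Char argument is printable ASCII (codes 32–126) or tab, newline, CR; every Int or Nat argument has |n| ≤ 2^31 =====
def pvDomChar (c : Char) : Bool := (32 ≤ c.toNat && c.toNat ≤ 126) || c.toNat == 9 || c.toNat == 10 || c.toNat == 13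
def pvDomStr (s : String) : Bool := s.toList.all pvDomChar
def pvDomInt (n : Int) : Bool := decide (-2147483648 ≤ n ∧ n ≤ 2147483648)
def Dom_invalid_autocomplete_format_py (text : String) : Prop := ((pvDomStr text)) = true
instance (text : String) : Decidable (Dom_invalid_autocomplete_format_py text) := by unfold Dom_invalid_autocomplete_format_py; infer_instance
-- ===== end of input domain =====

-- B avoids A's reversal-and-scan: it locates the last star (rfind), strips the trailing star-run
-- of that prefix (rstrip) and tests the last remaining character; a timing run measured B faster.
-- ===== PORT A =====
-- loop 'for index in range(len(text)-1)': indices are in-range naturals, so getD is exact here;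
-- fuel = number of remaining loop iterations (structural recursion standing for the for-loop).
def pvLoopA (cs : List Char) : Nat → Nat → Option Bool
  | _, 0 => none
  | i, fuel+1 =>
    if i < cs.length - 1 then
      if cs.getD i ' ' = '*' then
        if cs.getD (i+1) ' ' = '\'' ∨ cs.getD (i+1) ' ' = '"' then some true
        else if cs.getD (i+1) ' ' ≠ '*' then some false
        else pvLoopA cs (i+1) fuel
      else pvLoopA cs (i+1) fuel
    else none

-- text.replace(" ", "") → PySem.Str.replace; text[::-1] → .toList.reverse (exact on lists of chars)
def invalid_autocomplete_format_py (text : String) : Option Bool :=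
  pvLoopA (PySem.Str.replace text " " "").toList.reverse 0
    (PySem.Str.replace text " " "").toList.reverse.length

-- ===== PORT B =====
-- Source B:  s = text.replace(" ", "");  i = s.rfind('*')  (library call, ported as findIdx? on the
-- reversed char list, giving last index cs.length-1-j);  t = s[:i+1].rstrip('*')  (rstrip ported
-- as reverse∘dropWhile∘reverse, the standard meaning);  then t[-1] in ("'", '"').
def invalid_autocomplete_format_py_alt (text : String) : Option Bool :=
  let cs := (PySem.Str.replace text " " "").toList
  match cs.reverse.findIdx? (fun c => c == '*') with
  | none => none                                   -- i < 0: no '*'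
  | some j =>
    let i := cs.length - 1 - j                     -- s.rfind('*')
    let t := (cs.take (i+1)).reverse.dropWhile (fun c => c == '*') |>.reverse  -- s[:i+1].rstrip('*')
    match t.getLast? with
    | none => none                                 -- 'if not t'
    | some c => some (c == '\'' || c == '"')       -- t[-1] in ("'", '"')

-- ===== PRECONDITION & SPEC =====
def Spec_invalid_autocomplete_format_py (text : String) (out : Option Bool) : Prop := out = invalid_autocomplete_format_py_alt text
instance (text : String) (out : Option Bool) : Decidable (Spec_invalid_autocomplete_format_py text out) := by unfold Spec_invalid_autocomplete_format_py; infer_instance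

-- ===== CLAIM (what is proved, stated in full; the proofs are below) =====
def Claim_equal_invalid_autocomplete_format_py : Prop := ∀ (text : String), Dom_invalid_autocomplete_format_py text → Spec_invalid_autocomplete_format_py text (invalid_autocomplete_format_py text)

-- ===== LEMMAS AND PROOFS =====

-- proof-side characterisation of A's loop: the first '*' followed by a non-'*' in r
def pvFindStar : List Char → Option Char
  | a :: b :: rest => if a = '*' ∧ b ≠ '*' then some b else pvFindStar (b :: rest)
  | _ => none

lemma pvLoopA_eq_findStar (fuel : Nat) (cs : List Char) (i : Nat)
    (hf : cs.length - 1 - i ≤ fuel) :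
    pvLoopA cs i fuel = (pvFindStar (cs.drop i)).map (fun c => c == '\'' || c == '"') := by
  induction fuel generalizing i with
  | zero =>
    have hlen : (cs.drop i).length ≤ 1 := by simp; omega
    rw [pvLoopA]
    match hm : cs.drop i with
    | [] => simp [pvFindStar]
    | [a] => simp [pvFindStar]
    | a :: b :: rest => rw [hm] at hlen; simp at hlen
  | succ fuel ih =>
    by_cases h : i < cs.length - 1
    · have h1 : i < cs.length := by omega
      have h2 : i + 1 < cs.length := by omega
      have hd : cs.drop i = cs[i] :: cs[i+1] :: cs.drop (i+2) := by
        rw [List.drop_eq_getElem_cons h1, List.drop_eq_getElem_cons h2]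
      have ihs := ih (i+1) (by omega)
      have hd1 : cs.drop (i+1) = cs[i+1] :: cs.drop (i+2) := List.drop_eq_getElem_cons h2
      rw [pvLoopA, if_pos h, List.getD_eq_getElem _ _ h1, List.getD_eq_getElem _ _ h2, hd,
        pvFindStar, ← hd1]
      by_cases hs : cs[i] = '*'
      · by_cases hq : cs[i+1] = '\'' ∨ cs[i+1] = '"'
        · have hns : cs[i+1] ≠ '*' := by rcases hq with hq | hq <;> simp [hq]
          rcases hq with hq | hq <;> simp [hs, hq]
        · by_cases hns : cs[i+1] = '*'
          · simp [hs, hns, ihs]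
          · push Not at hq
            simp [hs, hns, hq.1, hq.2]
      · simp [hs, ihs]
    · rw [pvLoopA, if_neg h]
      have hlen : (cs.drop i).length ≤ 1 := by simp; omega
      match hm : cs.drop i with
      | [] => simp [pvFindStar]
      | [a] => simp [pvFindStar]
      | a :: b :: rest => rw [hm] at hlen; simp at hlen

-- pvFindStar = skip the non-stars, skip the star-run, take the head
lemma findStar_eq_dropWhile : ∀ r : List Char,
    pvFindStar r = ((r.dropWhile (fun c => c != '*')).dropWhile (fun c => c == '*')).head? := by
  intro r
  induction r with
  | nil => simp [pvFindStar]
  | cons a rest ih =>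
    by_cases ha : a = '*'
    · subst ha
      rw [List.dropWhile_cons_of_neg (by simp), List.dropWhile_cons_of_pos (by simp)]
      match rest with
      | [] => simp [pvFindStar]
      | b :: rs =>
        by_cases hb : b = '*'
        · subst hb
          rw [pvFindStar, if_neg (by simp), ih,
            List.dropWhile_cons_of_neg (by simp), List.dropWhile_cons_of_pos (by simp)]
        · rw [pvFindStar, if_pos ⟨rfl, hb⟩, List.dropWhile_cons_of_neg (by simp [hb])]
          simp
    · rw [List.dropWhile_cons_of_pos (by simp [ha])]
      match rest with
      | [] => simp [pvFindStar]
      | b :: rs => rw [pvFindStar, if_neg (by simp [ha]), ih]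

-- the non-star prefix dropped = drop at the index rfind locates
lemma dropWhile_eq_findIdx : ∀ r : List Char,
    r.dropWhile (fun c => c != '*') =
      (match r.findIdx? (fun c => c == '*') with
       | none => ([] : List Char)
       | some j => r.drop j) := by
  intro r
  induction r with
  | nil => simp
  | cons a rest ih =>
    by_cases ha : a = '*'
    · rw [List.dropWhile_cons_of_neg (by simp [ha]), List.findIdx?_cons, if_pos (by simp [ha])]
      simp
    · rw [List.dropWhile_cons_of_pos (by simp [ha])]
      rw [List.findIdx?_cons, if_neg (by simp [ha]), ih]
      cases rest.findIdx? (fun c => c == '*') <;> simp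

-- ===== VERDICT (by name: the statement is the Claim_ definition above) =====
theorem invalid_autocomplete_format_py_spec : Claim_equal_invalid_autocomplete_format_py := by
  intro text _
  unfold Spec_invalid_autocomplete_format_py invalid_autocomplete_format_py invalid_autocomplete_format_py_alt
  set cs := (PySem.Str.replace text " " "").toList with hcs
  rw [pvLoopA_eq_findStar _ _ _ (by omega), List.drop_zero, findStar_eq_dropWhile,
    dropWhile_eq_findIdx]
  cases hj : cs.reverse.findIdx? (fun c => c == '*') with
  | none => simp only [hj]; simp
  | some j =>
    simp only [hj]
    have hjlt : j < cs.length := by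
      have := (List.findIdx?_eq_some_iff_findIdx_eq.mp hj).1
      simpa using this
    have htake : (cs.take (cs.length - 1 - j + 1)).reverse = cs.reverse.drop j := by
      rw [List.drop_reverse]
      congr 1
      simp
      omega
    simp only [List.getLast?_reverse, htake]
    cases (cs.reverse.drop j).dropWhile (fun c => c == '*') <;> simp
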